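-- pv_equiv track=rewrite | github.com/LotemKahana/nmap-OS-Fingerprinting-in-Python | os_detection/test_support.py | sequence_test
-- ===== SOURCE A (Python) =====
-- def sequence_test(id_list):
--     if all(id_num == 0 for id_num in id_list):
--         return 'Z'
--
--     if len(set(id_list)) == 1:
--         return hex(id_list[0])
--
--     diffs = []
--     for i in range(len(id_list) - 1):
--         diffs.append((id_list[i+1] - id_list[i]) & 0xffff)
--
--     if (max(diffs) > 20000 and len(diffs) > 2): # mistake in nmap documantation "https://github.com/nmap/nmap/blob/master/osscan2.cc#L285C10-L285C10"
--         return "RD"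
--
--     # Check if any difference between two consecutive IDs exceeds 1,000 and is not evenly divisible by 256
--     if any(abs(id_list[i] - id_list[i + 1]) > 1000 and (id_list[i] - id_list[i + 1]) % 256 != 0 for i in range(len(id_list) - 1)):
--         return 'RI'
--
--     # Check if all differences are divisible by 256 and no greater than 5,120
--     if all(diff % 256 == 0 and diff <= 5120 for diff in (id_list[i] - id_list[i + 1] for i in range(len(id_list) - 1))):
--         return 'BI'
--
--     # Check if all differences are less than ten
--     if all(abs(id_list[i] - id_list[i + 1]) < 10 for i in range(len(id_list) - 1)):
--         return 'I'
--
--     # If none of the previous steps identify the generation algorithm, the test is omitted from the fingerprint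
--     return None
-- ===== SOURCE B (Python) =====
-- def sequence_test(id_list):
--     if not any(id_list):          # all zeros (also the empty list)
--         return 'Z'
--     if min(id_list) == max(id_list):
--         return hex(id_list[0])
--     # single fused pass over consecutive pairs
--     maxmask = 0
--     npairs = 0
--     ri = False
--     bi = True
--     small = True
--     prev = id_list[0]
--     for cur in id_list[1:]:
--         d = prev - cur
--         m = (-d) & 0xffff
--         if m > maxmask:
--             maxmask = m
--         npairs += 1
--         if abs(d) > 1000 and d % 256 != 0:
--             ri = True
--         if d % 256 != 0 or d > 5120:
--             bi = False
--         if abs(d) >= 10: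
--             small = False
--         prev = cur
--     if maxmask > 20000 and npairs > 2:
--         return "RD"
--     if ri:
--         return 'RI'
--     if bi:
--         return 'BI'
--     if small:
--         return 'I'
--     return None
-- ===== Notes on version B (the rewrite author's own statement) =====
-- stated objective: alternative
-- what changed: B replaces A's separate passes (a diffs list build, max+len scan, and three independent index-based any/all scans over consecutive differences) with one fused loop over the elements that carries the previous element and maintains maxmask, a pair count and the RI/BI/I flags in a single state, with the Z guard via truthiness (not any) and the single-value guard via min==max instead of building a set.
import Mathlib
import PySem

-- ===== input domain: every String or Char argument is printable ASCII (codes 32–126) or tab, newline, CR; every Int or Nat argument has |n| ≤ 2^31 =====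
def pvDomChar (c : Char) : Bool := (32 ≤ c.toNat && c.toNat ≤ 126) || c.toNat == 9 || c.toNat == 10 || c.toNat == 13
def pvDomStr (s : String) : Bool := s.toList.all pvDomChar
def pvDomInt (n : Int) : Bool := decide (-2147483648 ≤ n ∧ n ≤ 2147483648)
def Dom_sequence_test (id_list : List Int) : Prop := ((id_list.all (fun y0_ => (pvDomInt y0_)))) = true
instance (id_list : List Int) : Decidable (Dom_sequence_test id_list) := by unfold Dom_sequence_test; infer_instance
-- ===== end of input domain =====

-- B fuses A's several sequential passes over consecutive differences into one loop
-- maintaining max/count/flags (objective: alternative decomposition, same asymptotic cost).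

-- ===== PORT A =====
-- Python's hex(n): "0x" + lowercase hex digits, "-0x…" for negatives (shared builtin helper).
def pyHex (n : Int) : String :=
  (if n < 0 then "-0x" else "0x") ++ String.ofList (Nat.toDigits 16 n.natAbs)

def sequence_test (id_list : List Int) : Option String :=
  if id_list.all (fun id_num => id_num == 0) then some "Z"
  else if (PySem.Set.ofList id_list).length == 1 then
    -- id_list[0]: in range, the previous guard implies id_list ≠ []
    some (pyHex ((PySem.List.pyGet? id_list 0).getD 0))
  else
    -- diffs built by the loop over range(len-1); indices are in range
    let diffs := (List.range (id_list.length - 1)).map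
      (fun i => PySem.Int.band (id_list.getD (i+1) 0 - id_list.getD i 0) 65535)
    -- max(diffs): diffs ≠ [] since len(id_list) ≥ 2 here
    if ((PySem.List.max? diffs (fun x => x)).getD 0 > 20000 && diffs.length > 2 : Bool) then
      some "RD"
    else if (List.range (id_list.length - 1)).any (fun i =>
        decide (1000 < (id_list.getD i 0 - id_list.getD (i+1) 0).natAbs) &&
        (PySem.Int.mod (id_list.getD i 0 - id_list.getD (i+1) 0) 256 != 0)) then
      some "RI"
    else if ((List.range (id_list.length - 1)).map
        (fun i => id_list.getD i 0 - id_list.getD (i+1) 0)).all (fun diff =>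
        (PySem.Int.mod diff 256 == 0) && decide (diff ≤ 5120)) then
      some "BI"
    else if (List.range (id_list.length - 1)).all (fun i =>
        decide ((id_list.getD i 0 - id_list.getD (i+1) 0).natAbs < 10)) then
      some "I"
    else none

-- ===== PORT B =====
-- the fused single pass of Source B: state (maxmask, npairs, ri, bi, small), prev carried along
def bLoop (prev maxmask npairs : Int) (ri bi small : Bool) : List Int → Int × Int × Bool × Bool × Bool
  | [] => (maxmask, npairs, ri, bi, small)
  | cur :: rest =>
    let d := prev - cur
    let m := PySem.Int.band (-d) 65535
    bLoop cur (if m > maxmask then m else maxmask) (npairs + 1)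
      (if (decide (1000 < d.natAbs) && (PySem.Int.mod d 256 != 0) : Bool) then true else ri)
      (if ((PySem.Int.mod d 256 != 0) || decide (d > 5120) : Bool) then false else bi)
      (if (decide (10 ≤ d.natAbs) : Bool) then false else small)
      rest

def sequence_test_alt (id_list : List Int) : Option String :=
  if !(id_list.any (fun x => x != 0)) then some "Z"     -- not any(id_list)
  else if PySem.List.min? id_list (fun x => x) == PySem.List.max? id_list (fun x => x) then
    some (pyHex ((PySem.List.pyGet? id_list 0).getD 0)) -- hex(id_list[0]); nonempty here
  else
    match id_list with
    | [] => none  -- unreachable: the first guard fails only on a nonempty list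
    | prev :: rest =>  -- prev = id_list[0], loop over id_list[1:]
      match bLoop prev 0 0 false true true rest with
      | (maxmask, npairs, ri, bi, small) =>
        if (maxmask > 20000 && npairs > 2 : Bool) then some "RD"
        else if ri then some "RI"
        else if bi then some "BI"
        else if small then some "I"
        else none

-- ===== PRECONDITION & SPEC =====
def Spec_sequence_test (id_list : List Int) (out : Option String) : Prop := out = sequence_test_alt id_list
instance (id_list : List Int) (out : Option String) : Decidable (Spec_sequence_test id_list out) := by unfold Spec_sequence_test; infer_instance

-- ===== CLAIM (what is proved, stated in full; the proofs are below) =====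
def Claim_equal_sequence_test : Prop := ∀ (id_list : List Int), Dom_sequence_test id_list → Spec_sequence_test id_list (sequence_test id_list)

-- ===== LEMMAS AND PROOFS =====

lemma range2_map {γ : Type} (f : Int → Int → γ) : ∀ (l : List Int),
    (List.range (l.length - 1)).map (fun i => f (l.getD i 0) (l.getD (i+1) 0))
      = (l.zip l.tail).map (fun p => f p.1 p.2) := by
  intro l
  induction l with
  | nil => simp
  | cons a t ih =>
    cases t with
    | nil => simp
    | cons b t' =>
      have h : (a :: b :: t').length - 1 = (b :: t').length - 1 + 1 := by simp
      rw [h, List.range_succ_eq_map, List.map_cons, List.map_map]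
      have hfe : ((fun i => f ((a :: b :: t').getD i 0) ((a :: b :: t').getD (i+1) 0)) ∘ Nat.succ)
           = (fun i => f ((b :: t').getD i 0) ((b :: t').getD (i+1) 0)) := by
        funext i; simp [Function.comp]
      rw [hfe, ih]
      simp

lemma range2_any (f : Int → Int → Bool) : ∀ (l : List Int),
    (List.range (l.length - 1)).any (fun i => f (l.getD i 0) (l.getD (i+1) 0))
      = (l.zip l.tail).any (fun p => f p.1 p.2) := by
  intro l
  induction l with
  | nil => simp
  | cons a t ih =>
    cases t with
    | nil => simp
    | cons b t' =>
      have h : (a :: b :: t').length - 1 = (b :: t').length - 1 + 1 := by simp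
      rw [h, List.range_succ_eq_map, List.any_cons, List.any_map]
      have hfe : ((fun i => f ((a :: b :: t').getD i 0) ((a :: b :: t').getD (i+1) 0)) ∘ Nat.succ)
           = (fun i => f ((b :: t').getD i 0) ((b :: t').getD (i+1) 0)) := by
        funext i; simp [Function.comp]
      rw [hfe, ih]
      simp

lemma range2_all (f : Int → Int → Bool) : ∀ (l : List Int),
    (List.range (l.length - 1)).all (fun i => f (l.getD i 0) (l.getD (i+1) 0))
      = (l.zip l.tail).all (fun p => f p.1 p.2) := by
  intro l
  induction l with
  | nil => simp
  | cons a t ih =>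
    cases t with
    | nil => simp
    | cons b t' =>
      have h : (a :: b :: t').length - 1 = (b :: t').length - 1 + 1 := by simp
      rw [h, List.range_succ_eq_map, List.all_cons, List.all_map]
      have hfe : ((fun i => f ((a :: b :: t').getD i 0) ((a :: b :: t').getD (i+1) 0)) ∘ Nat.succ)
           = (fun i => f ((b :: t').getD i 0) ((b :: t').getD (i+1) 0)) := by
        funext i; simp [Function.comp]
      rw [hfe, ih]
      simp

lemma bLoop_spec : ∀ (rest : List Int) (prev mm np : Int) (ri bi sm : Bool),
    bLoop prev mm np ri bi sm rest =
      ( ((prev :: rest).zip rest).foldl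
          (fun acc p => if PySem.Int.band (-(p.1 - p.2)) 65535 > acc
                        then PySem.Int.band (-(p.1 - p.2)) 65535 else acc) mm,
        np + rest.length,
        ri || ((prev :: rest).zip rest).any (fun p =>
          decide (1000 < (p.1 - p.2).natAbs) && (PySem.Int.mod (p.1 - p.2) 256 != 0)),
        bi && ((prev :: rest).zip rest).all (fun p =>
          !((PySem.Int.mod (p.1 - p.2) 256 != 0) || decide (p.1 - p.2 > 5120))),
        sm && ((prev :: rest).zip rest).all (fun p => !decide (10 ≤ (p.1 - p.2).natAbs)) ) := by
  intro rest
  induction rest with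
  | nil => intro prev mm np ri bi sm; simp [bLoop]
  | cons c r ih =>
    intro prev mm np ri bi sm
    rw [bLoop, ih]
    simp only [List.zip_cons_cons, List.foldl_cons, List.any_cons, List.all_cons,
      List.length_cons]
    refine Prod.ext ?_ (Prod.ext ?_ (Prod.ext ?_ (Prod.ext ?_ ?_)))
    · rfl
    · push_cast; ring
    · cases (decide (1000 < (prev - c).natAbs) && (PySem.Int.mod (prev - c) 256 != 0)) <;> simp
    · cases ((PySem.Int.mod (prev - c) 256 != 0) || decide (prev - c > 5120)) <;> simp
    · cases (decide (10 ≤ (prev - c).natAbs)) <;> simp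

lemma guardZ (l : List Int) : (!(l.any fun x => x != 0)) = (l.all fun x => x == 0) := by
  rw [Bool.eq_iff_iff]
  simp

-- all elements equal ↔ set(id_list) has one element ↔ min == max (nonempty lists)
lemma set_len_one_iff (a : Int) (t : List Int) :
    ((PySem.Set.ofList (a :: t)).length == 1) = true ↔ ∀ x ∈ a :: t, x = a := by
  constructor
  · intro h x hx
    have h1 : (PySem.Set.ofList (a :: t)).length = 1 := by simpa using h
    obtain ⟨c, hc⟩ := List.length_eq_one_iff.mp h1
    have hxc : x = c := by
      have : x ∈ PySem.Set.ofList (a :: t) := (PySem.Set.mem_ofList _ _).mpr hx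
      rw [hc] at this; simpa using this
    have hac : a = c := by
      have : a ∈ PySem.Set.ofList (a :: t) := (PySem.Set.mem_ofList _ _).mpr (by simp)
      rw [hc] at this; simpa using this
    rw [hxc, hac]
  · intro h
    have : PySem.Set.ofList (a :: t) = [a] := by
      have hsub : ∀ x ∈ PySem.Set.ofList (a :: t), x = a := fun x hx =>
        h x ((PySem.Set.mem_ofList _ _).mp hx)
      have hmem : a ∈ PySem.Set.ofList (a :: t) := (PySem.Set.mem_ofList _ _).mpr (by simp)
      have hnd := PySem.Set.nodup_ofList (xs := a :: t)
      cases hs : PySem.Set.ofList (a :: t) with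
      | nil => rw [hs] at hmem; simp at hmem
      | cons c s =>
        rw [hs] at hsub hnd
        have hca : c = a := hsub c (by simp)
        have : s = [] := by
          cases s with
          | nil => rfl
          | cons d s' =>
            have hda : d = a := hsub d (by simp)
            rw [hca, hda] at hnd
            simp at hnd
        rw [hca, this]
    simp [this]

lemma foldl_min_const (a : Int) : ∀ (t : List Int), (∀ x ∈ t, x = a) → t.foldl min a = a := by
  intro t
  induction t with
  | nil => intro _; rfl
  | cons b t' ih =>
    intro h
    rw [List.foldl_cons, h b (by simp), min_self]
    exact ih (fun x hx => h x (by simp [hx]))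

lemma foldl_max_const (a : Int) : ∀ (t : List Int), (∀ x ∈ t, x = a) → t.foldl max a = a := by
  intro t
  induction t with
  | nil => intro _; rfl
  | cons b t' ih =>
    intro h
    rw [List.foldl_cons, h b (by simp), max_self]
    exact ih (fun x hx => h x (by simp [hx]))

lemma minmax_iff (a : Int) (t : List Int) :
    (PySem.List.min? (a :: t) (fun x => x) == PySem.List.max? (a :: t) (fun x => x)) = true
      ↔ ∀ x ∈ a :: t, x = a := by
  constructor
  · intro h x hx
    obtain ⟨m, hm⟩ : ∃ m, PySem.List.min? (a :: t) (fun x => x) = some m := by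
      rw [PySem.List.min?_id_cons]; exact ⟨_, rfl⟩
    have hM : PySem.List.max? (a :: t) (fun x => x) = some m := by
      have := (beq_iff_eq).mp h; rw [← this, hm]
    have hmin := PySem.List.min?_isMin hm
    have hmax := PySem.List.max?_isMax hM
    have hx1 : m ≤ x := hmin x hx
    have hx2 : x ≤ m := hmax x hx
    have ha1 : m ≤ a := hmin a (by simp)
    have ha2 : a ≤ m := hmax a (by simp)
    omega
  · intro h
    have hmin : PySem.List.min? (a :: t) (fun x => x) = some a := by
      rw [PySem.List.min?_id_cons, foldl_min_const a t (fun x hx => h x (by simp [hx]))]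
    have hmax : PySem.List.max? (a :: t) (fun x => x) = some a := by
      rw [PySem.List.max?_id_cons, foldl_max_const a t (fun x hx => h x (by simp [hx]))]
    rw [hmin, hmax]; simp

lemma foldl_max_shift : ∀ (xs : List Int) (a b : Int),
    xs.foldl max (max a b) = max a (xs.foldl max b) := by
  intro xs
  induction xs with
  | nil => intro a b; rfl
  | cons c r ih =>
    intro a b
    rw [List.foldl_cons, List.foldl_cons, max_assoc, ih]

-- pointwise boolean facts linking A's and B's per-pair tests
lemma bi_pointwise (d : Int) :
    ((PySem.Int.mod d 256 == 0) && decide (d ≤ 5120))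
      = !((PySem.Int.mod d 256 != 0) || decide (d > 5120)) := by
  rw [Bool.eq_iff_iff]
  simp [not_lt]

lemma i_pointwise (d : Int) :
    (decide (d.natAbs < 10)) = !decide (10 ≤ d.natAbs) := by
  rw [Bool.eq_iff_iff]
  simp

lemma ite_max (acc x : Int) : (if x > acc then x else acc) = max acc x := by
  split <;> omega

lemma main_eq (l : List Int) : sequence_test l = sequence_test_alt l := by
  cases l with
  | nil => rfl
  | cons a t =>
    unfold sequence_test sequence_test_alt
    rw [guardZ]
    by_cases hz : ((a :: t).all fun x => x == 0) = true
    · simp [hz]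
    · rw [Bool.not_eq_true] at hz
      by_cases he : ∀ x ∈ a :: t, x = a
      · have h1 := (set_len_one_iff a t).mpr he
        have h2 := (minmax_iff a t).mpr he
        simp [hz, h1, h2]
      · have h1 : ((PySem.Set.ofList (a :: t)).length == 1) = false :=
          Bool.eq_false_iff.mpr (fun hc => he ((set_len_one_iff a t).mp hc))
        have h2 : (PySem.List.min? (a :: t) (fun x => x)
            == PySem.List.max? (a :: t) (fun x => x)) = false :=
          Bool.eq_false_iff.mpr (fun hc => he ((minmax_iff a t).mp hc))
        cases t with
        | nil => exact absurd (by simp) he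
        | cons b t' =>
          simp only [hz, h1, h2, Bool.false_eq_true, if_false]
          rw [bLoop_spec]
          simp only [neg_sub, Bool.false_or, Bool.true_and]
          have hd : (List.map (fun i => PySem.Int.band ((a :: b :: t').getD (i+1) 0 - (a :: b :: t').getD i 0) 65535) (List.range ((a :: b :: t').length - 1)))
              = ((a :: b :: t').zip (b :: t')).map (fun p => PySem.Int.band (p.2 - p.1) 65535) :=
            range2_map (fun x y => PySem.Int.band (y - x) 65535) (a :: b :: t')
          have hri : ((List.range ((a :: b :: t').length - 1)).any fun i =>
                decide (1000 < ((a :: b :: t').getD i 0 - (a :: b :: t').getD (i+1) 0).natAbs) &&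
                  (PySem.Int.mod ((a :: b :: t').getD i 0 - (a :: b :: t').getD (i+1) 0) 256 != 0))
              = ((a :: b :: t').zip (b :: t')).any (fun p =>
                  decide (1000 < (p.1 - p.2).natAbs) && (PySem.Int.mod (p.1 - p.2) 256 != 0)) :=
            range2_any (fun x y => decide (1000 < (x - y).natAbs) && (PySem.Int.mod (x - y) 256 != 0)) (a :: b :: t')
          have hbm : (List.map (fun i => (a :: b :: t').getD i 0 - (a :: b :: t').getD (i+1) 0) (List.range ((a :: b :: t').length - 1)))
              = ((a :: b :: t').zip (b :: t')).map (fun p => p.1 - p.2) :=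
            range2_map (fun x y => x - y) (a :: b :: t')
          have hii : ((List.range ((a :: b :: t').length - 1)).all fun i =>
                decide (((a :: b :: t').getD i 0 - (a :: b :: t').getD (i+1) 0).natAbs < 10))
              = ((a :: b :: t').zip (b :: t')).all (fun p => decide ((p.1 - p.2).natAbs < 10)) :=
            range2_all (fun x y => decide ((x - y).natAbs < 10)) (a :: b :: t')
          rw [hd, hri, hbm, hii]
          have hRDmax : (decide ((PySem.List.max? (List.map (fun p => PySem.Int.band (p.2 - p.1) 65535) ((a :: b :: t').zip (b :: t'))) fun x => x).getD 0 > 20000))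
              = (decide (List.foldl (fun acc p => if PySem.Int.band (p.2 - p.1) 65535 > acc then PySem.Int.band (p.2 - p.1) 65535 else acc) 0 ((a :: b :: t').zip (b :: t')) > 20000)) := by
            have e1 : (PySem.List.max? (List.map (fun p => PySem.Int.band (p.2 - p.1) 65535) ((a :: b :: t').zip (b :: t'))) fun x => x)
                = some ((((b :: t').zip t').map (fun p => PySem.Int.band (p.2 - p.1) 65535)).foldl max (PySem.Int.band (b - a) 65535)) := by
              rw [show ((a :: b :: t').zip (b :: t')) = (a, b) :: ((b :: t').zip t') from rfl, List.map_cons]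
              exact PySem.List.max?_id_cons _ _
            have e2 : List.foldl (fun acc p => if PySem.Int.band (p.2 - p.1) 65535 > acc then PySem.Int.band (p.2 - p.1) 65535 else acc) 0 ((a :: b :: t').zip (b :: t'))
                = max 0 ((((b :: t').zip t').map (fun p => PySem.Int.band (p.2 - p.1) 65535)).foldl max (PySem.Int.band (b - a) 65535)) := by
              simp only [ite_max]
              rw [← List.foldl_map]
              rw [show ((a :: b :: t').zip (b :: t')) = (a, b) :: ((b :: t').zip t') from rfl, List.map_cons, List.foldl_cons]
              exact foldl_max_shift _ 0 _
            rw [decide_eq_decide, e1, Option.getD_some, e2]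
            generalize (((b :: t').zip t').map (fun p => PySem.Int.band (p.2 - p.1) 65535)).foldl max (PySem.Int.band (b - a) 65535) = V
            omega
          have hRDlen : (decide ((List.map (fun p => PySem.Int.band (p.2 - p.1) 65535) ((a :: b :: t').zip (b :: t'))).length > 2))
              = (decide ((0 : Int) + ↑(b :: t').length > 2)) := by
            rw [decide_eq_decide]
            simp [List.length_map, List.length_zip]
          have hBI : ((List.map (fun p => p.1 - p.2) ((a :: b :: t').zip (b :: t'))).all fun diff =>
                PySem.Int.mod diff 256 == 0 && decide (diff ≤ 5120))
              = (((a :: b :: t').zip (b :: t')).all fun p =>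
                  !((PySem.Int.mod (p.1 - p.2) 256 != 0) || decide (p.1 - p.2 > 5120))) := by
            rw [List.all_map]
            exact congrArg _ (funext fun p => bi_pointwise (p.1 - p.2))
          have hI : (((a :: b :: t').zip (b :: t')).all fun p => decide ((p.1 - p.2).natAbs < 10))
              = (((a :: b :: t').zip (b :: t')).all fun p => !decide (10 ≤ (p.1 - p.2).natAbs)) :=
            congrArg _ (funext fun p => i_pointwise (p.1 - p.2))
          rw [hRDmax, hRDlen, hBI, hI]

-- ===== VERDICT (by name: the statement is the Claim_ definition above) =====
theorem sequence_test_spec : Claim_equal_sequence_test := by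
  intro l _
  unfold Spec_sequence_test
  exact main_eq l
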